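-- pv_equiv track=rewrite | github.com/springcell/AgentPilot | agent/log_report.py | group_events_by_task
-- ===== SOURCE A (Python) =====
-- from collections import Counter, defaultdict
--
-- def group_events_by_task(events: list[dict]) -> dict[str, list[dict]]:
--     grouped: dict[str, list[dict]] = defaultdict(list)
--     for event in events:
--         task_id = event.get("task_id", "")
--         if task_id:
--             grouped[task_id].append(event)
--     for task_id in grouped:
--         grouped[task_id].sort(key=lambda item: item.get("ts", ""))
--     return grouped
-- ===== SOURCE B (Python) =====
-- def group_events_by_task(events: list[dict]) -> dict[str, list[dict]]:
--     ids = [e.get("task_id", "") for e in events]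
--     grouped = {tid: [] for tid in dict.fromkeys(t for t in ids if t)}
--     for event in sorted(events, key=lambda item: item.get("ts", "")):
--         tid = event.get("task_id", "")
--         if tid:
--             grouped[tid].append(event)
--     return grouped
-- ===== Notes on version B (the rewrite author's own statement) =====
-- stated objective: alternative
-- what changed: B sorts the whole event list once by timestamp (relying on sort stability) and then builds the groups in a single pass over the pre-registered keys, instead of A's grouping first and then sorting every group separately.
import Mathlib
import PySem

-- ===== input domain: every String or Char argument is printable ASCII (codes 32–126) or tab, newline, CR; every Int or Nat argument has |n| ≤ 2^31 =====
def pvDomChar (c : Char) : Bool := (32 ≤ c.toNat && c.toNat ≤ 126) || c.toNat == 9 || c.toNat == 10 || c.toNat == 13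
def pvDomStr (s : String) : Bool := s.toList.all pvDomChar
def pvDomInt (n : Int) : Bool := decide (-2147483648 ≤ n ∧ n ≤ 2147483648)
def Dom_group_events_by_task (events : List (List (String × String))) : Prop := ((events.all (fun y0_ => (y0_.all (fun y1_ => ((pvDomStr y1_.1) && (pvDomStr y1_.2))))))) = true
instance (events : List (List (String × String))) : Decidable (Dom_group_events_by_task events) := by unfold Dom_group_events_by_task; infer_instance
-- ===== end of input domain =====

-- B sorts the whole event list once by timestamp (stable) and then groups in a single pass,
-- instead of A's group-first-then-sort-every-group; same return value, different decomposition.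
-- (Note: A returns a defaultdict and B a plain dict — equal as Python dicts.)

-- event.get(k, "")
def pvEvGet (e : List (String × String)) (k : String) : String :=
  PySem.Dict.getD ⟨e⟩ k ""

-- ===== PORT A =====
def group_events_by_task (events : List (List (String × String))) : List (String × List (List (String × String))) :=
  let grouped := events.foldl (fun d e =>
      let tid := pvEvGet e "task_id"
      if tid ≠ "" then d.modify tid [] (· ++ [e]) else d)
    PySem.Dict.empty
  grouped.items.map (fun p => (p.1, PySem.List.sorted p.2 (fun it => pvEvGet it "ts") false))

-- ===== PORT B =====
def group_events_by_task_alt (events : List (List (String × String))) : List (String × List (List (String × String))) :=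
  let ids := events.map (fun e => pvEvGet e "task_id")
  let order := PySem.List.dedup (ids.filter (fun t => decide (t ≠ "")))
  let init := order.foldl (fun d t => d.insert t ([] : List (List (String × String)))) PySem.Dict.empty
  let grouped := (PySem.List.sorted events (fun it => pvEvGet it "ts") false).foldl
      (fun d e =>
        let tid := pvEvGet e "task_id"
        if tid ≠ "" then d.modify tid [] (· ++ [e]) else d) init
  grouped.items

-- ===== PRECONDITION & SPEC =====
def Spec_group_events_by_task (events : List (List (String × String))) (out : List (String × List (List (String × String)))) : Prop := out = group_events_by_task_alt events
instance (events : List (List (String × String))) (out : List (String × List (List (String × String)))) : Decidable (Spec_group_events_by_task events out) := by unfold Spec_group_events_by_task; infer_instance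

-- ===== CLAIM (what is proved, stated in full; the proofs are below) =====
def Claim_equal_group_events_by_task : Prop := ∀ (events : List (List (String × String))), Dom_group_events_by_task events → Spec_group_events_by_task events (group_events_by_task events)

-- ===== LEMMAS AND PROOFS =====

-- if x sorts strictly before everything in l, insertion puts it in front
theorem pv_insertBy_front {α κ : Type} [LinearOrder κ] (key : α → κ) (x : α) (l : List α)
    (h : ∀ z ∈ l, key x < key z) :
    PySem.List.insertBy (fun a b => decide (key a < key b)) x l = x :: l := by
  cases l with
  | nil => rfl
  | cons z t => simp [PySem.List.insertBy, h z (by simp)]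

-- filtering commutes with a single stable insertion into a key-sorted list
theorem pv_filter_insertBy {α κ : Type} [LinearOrder κ] (key : α → κ) (q : α → Bool) (x : α) (l : List α)
    (hl : l.Pairwise (fun a b => key a ≤ key b)) :
    (PySem.List.insertBy (fun a b => decide (key a < key b)) x l).filter q
      = if q x then PySem.List.insertBy (fun a b => decide (key a < key b)) x (l.filter q)
        else l.filter q := by
  induction l with
  | nil => cases hqx : q x <;> simp [PySem.List.insertBy, List.filter, hqx]
  | cons y ys ih =>
    rcases List.pairwise_cons.mp hl with ⟨hy, hys⟩
    by_cases hxy : key x < key y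
    · have hins : PySem.List.insertBy (fun a b => decide (key a < key b)) x (y :: ys) = x :: y :: ys := by
        simp [PySem.List.insertBy, hxy]
      rw [hins]
      cases hqx : q x <;> cases hqy : q y
      · simp [List.filter, hqx, hqy]
      · simp [List.filter, hqx, hqy]
      · -- q x true, q y false: x must go to the front of filter q ys
        have hfront : PySem.List.insertBy (fun a b => decide (key a < key b)) x ((y :: ys).filter q)
            = x :: (y :: ys).filter q := by
          apply pv_insertBy_front
          intro z hz
          have hz' : z ∈ ys := by
            have := List.mem_filter.mp (by simpa [List.filter, hqy] using hz)
            exact this.1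
          exact lt_of_lt_of_le hxy (hy z hz')
        rw [if_pos rfl, hfront]
        simp [List.filter, hqx, hqy]
      · have hfront : PySem.List.insertBy (fun a b => decide (key a < key b)) x ((y :: ys).filter q)
            = x :: (y :: ys).filter q := by
          apply pv_insertBy_front
          intro z hz
          rcases List.mem_filter.mp hz with ⟨hz', _⟩
          rcases List.mem_cons.mp hz' with h | h
          · subst h; exact hxy
          · exact lt_of_lt_of_le hxy (hy z h)
        rw [if_pos rfl, hfront]
        simp [List.filter, hqx, hqy]
    · have hins : PySem.List.insertBy (fun a b => decide (key a < key b)) x (y :: ys)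
          = y :: PySem.List.insertBy (fun a b => decide (key a < key b)) x ys := by
        simp [PySem.List.insertBy, hxy]
      rw [hins]
      cases hqx : q x <;> cases hqy : q y
      · simp [List.filter, hqy, ih hys, hqx]
      · simp [List.filter, hqy, ih hys, hqx]
      · simp [List.filter, hqy, ih hys, hqx]
      · have hins2 : PySem.List.insertBy (fun a b => decide (key a < key b)) x (y :: ys.filter q)
            = y :: PySem.List.insertBy (fun a b => decide (key a < key b)) x (ys.filter q) := by
          simp [PySem.List.insertBy, hxy]
        simp [List.filter, hqy, hqx, ih hys, hins2]

-- filtering commutes with the stable sort (Python's sort is stable)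
theorem pv_filter_sorted {α κ : Type} [LinearOrder κ] (key : α → κ) (q : α → Bool) (xs : List α) :
    (PySem.List.sorted xs key false).filter q = PySem.List.sorted (xs.filter q) key false := by
  induction xs using List.reverseRecOn with
  | nil => rfl
  | append_singleton xs x ih =>
    have hs : ∀ (l : List α), PySem.List.sorted (l ++ [x]) key false
        = PySem.List.insertBy (fun a b => decide (key a < key b)) x (PySem.List.sorted l key false) := by
      intro l; simp [PySem.List.sorted, List.foldl_append]
    rw [hs, pv_filter_insertBy key q x _ (PySem.List.sorted_pairwise xs key), List.filter_append]
    cases hqx : q x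
    · simp [hqx, ih]
    · simp [hqx, ih, hs]

theorem pv_A_form (events : List (List (String × String))) :
    group_events_by_task events =
      (PySem.Set.ofList ((events.filter (fun e => decide (pvEvGet e "task_id" ≠ ""))).map (fun e => pvEvGet e "task_id"))).map
        (fun c => (c, PySem.List.sorted
          ((events.filter (fun e => decide (pvEvGet e "task_id" ≠ ""))).filter (fun e => pvEvGet e "task_id" == c))
          (fun it => pvEvGet it "ts") false)) := by
  unfold group_events_by_task
  rw [PySem.List.foldl_ite_eq_foldl_filter (p := fun e => pvEvGet e "task_id" ≠ "")
      (f := fun d e => PySem.Dict.modify d (pvEvGet e "task_id") [] (· ++ [e]))]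
  set L := events.filter (fun e => decide (pvEvGet e "task_id" ≠ "")) with hL
  set dA := L.foldl (fun d e => PySem.Dict.modify d (pvEvGet e "task_id") [] (· ++ [e])) PySem.Dict.empty with hdA
  have hkeys : dA.keys = PySem.Set.ofList (L.map (fun e => pvEvGet e "task_id")) := by
    rw [hdA, PySem.Dict.keys_foldl_modify_key L (fun e => pvEvGet e "task_id") [] (fun _ e v => v ++ [e])]
    simp [PySem.Set.update, PySem.Set.ofList_eq_foldl, PySem.Dict.keys_empty]
  have hnd : dA.keys.Nodup := by
    rw [hkeys]; exact PySem.Set.nodup_ofList _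
  have hgetD : ∀ c, dA.getD c [] = L.filter (fun e => pvEvGet e "task_id" == c) := by
    intro c
    have : dA = (L.map (fun e => (pvEvGet e "task_id", e))).foldl
        (fun d p => PySem.Dict.modify d p.1 [] (· ++ [p.2])) PySem.Dict.empty := by
      rw [hdA, List.foldl_map]
    rw [this, PySem.Dict.getD_foldl_modify_append]
    simp [List.filter_map, Function.comp_def, List.map_map]
  show (dA.items.map (fun p => (p.1, PySem.List.sorted p.2 (fun it => pvEvGet it "ts") false))) = _
  rw [PySem.Dict.items_eq_map_keys dA hnd ([] : List (List (String × String))), hkeys, List.map_map]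
  apply List.map_congr_left
  intro c hc
  simp [hgetD c]


theorem pv_B_form (events : List (List (String × String))) :
    group_events_by_task_alt events =
      (PySem.Set.ofList ((events.filter (fun e => decide (pvEvGet e "task_id" ≠ ""))).map (fun e => pvEvGet e "task_id"))).map
        (fun c => (c,
          (PySem.List.sorted (events.filter (fun e => decide (pvEvGet e "task_id" ≠ ""))) (fun it => pvEvGet it "ts") false).filter
            (fun e => pvEvGet e "task_id" == c))) := by
  unfold group_events_by_task_alt
  show ((PySem.List.sorted events (fun it => pvEvGet it "ts") false).foldl
      (fun d e => if pvEvGet e "task_id" ≠ "" then PySem.Dict.modify d (pvEvGet e "task_id") [] (· ++ [e]) else d)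
      ((PySem.List.dedup ((events.map (fun e => pvEvGet e "task_id")).filter (fun t => decide (t ≠ "")))).foldl
        (fun d t => d.insert t ([] : List (List (String × String)))) PySem.Dict.empty)).items = _
  rw [PySem.List.foldl_ite_eq_foldl_filter (p := fun e => pvEvGet e "task_id" ≠ "")
      (f := fun d e => PySem.Dict.modify d (pvEvGet e "task_id") [] (· ++ [e]))]
  set L := events.filter (fun e => decide (pvEvGet e "task_id" ≠ "")) with hL
  set K := PySem.Set.ofList (L.map (fun e => pvEvGet e "task_id")) with hK
  have horder : PySem.List.dedup ((events.map (fun e => pvEvGet e "task_id")).filter (fun t => decide (t ≠ ""))) = K := by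
    rw [hK, hL, List.filter_map, PySem.List.dedup]
    rfl
  rw [horder]
  set M := (PySem.List.sorted events (fun it => pvEvGet it "ts") false).filter
      (fun e => decide (pvEvGet e "task_id" ≠ "")) with hM
  have hMs : M = PySem.List.sorted L (fun it => pvEvGet it "ts") false := by
    rw [hM, hL]
    exact pv_filter_sorted _ _ _
  have hKnd : K.Nodup := by rw [hK]; exact PySem.Set.nodup_ofList _
  set init := K.foldl (fun d t => d.insert t ([] : List (List (String × String)))) PySem.Dict.empty with hinit
  have hitems0 : init.items = K.map (fun t => (t, ([] : List (List (String × String))))) := by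
    rw [hinit, PySem.Dict.items_foldl_insert_fresh K (fun t => t) (fun _ => []) PySem.Dict.empty
      (by intro a _; exact PySem.Dict.contains_empty a) (by simpa using hKnd)]
    rfl
  have hkeys0 : init.keys = K := by
    show init.items.map (·.1) = K
    rw [hitems0, List.map_map]
    exact List.map_id _
  have hnd0 : init.keys.Nodup := by rw [hkeys0, hK]; exact PySem.Set.nodup_ofList _
  have hgetD0 : ∀ c, init.getD c [] = [] := by
    intro c
    by_cases hc : c ∈ K
    · exact PySem.Dict.getD_of_mem_items init (by rw [hitems0]; exact List.mem_map_of_mem hc) hnd0 []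
    · apply PySem.Dict.getD_of_not_contains
      rw [PySem.Dict.contains_eq_decide_mem_keys, hkeys0]
      simpa using hc
  set dB := M.foldl (fun d e => PySem.Dict.modify d (pvEvGet e "task_id") [] (· ++ [e])) init with hdB
  have hkeysB : dB.keys = K := by
    rw [hdB, PySem.Dict.keys_foldl_modify_key M (fun e => pvEvGet e "task_id") [] (fun _ e v => v ++ [e]), hkeys0,
      PySem.Set.update_eq_append_filter]
    have : (PySem.Set.ofList (M.map (fun e => pvEvGet e "task_id"))).filter (fun y => !PySem.Set.contains K y) = [] := by
      apply List.filter_eq_nil_iff.mpr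
      intro y hy
      have hy' : y ∈ M.map (fun e => pvEvGet e "task_id") := (PySem.Set.mem_ofList _ y).mp hy
      rcases List.mem_map.mp hy' with ⟨e, he, rfl⟩
      have heL : e ∈ L := by
        rw [hMs] at he
        exact (PySem.List.mem_sorted _ _ _ _).mp he
      have : pvEvGet e "task_id" ∈ K := by
        rw [hK]
        exact (PySem.Set.mem_ofList _ _).mpr (List.mem_map_of_mem heL)
      simp [PySem.Set.contains, this]
    rw [this, List.append_nil]
  have hndB : dB.keys.Nodup := by rw [hkeysB, hK]; exact PySem.Set.nodup_ofList _
  have hgetDB : ∀ c, dB.getD c [] = M.filter (fun e => pvEvGet e "task_id" == c) := by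
    intro c
    have : dB = (M.map (fun e => (pvEvGet e "task_id", e))).foldl
        (fun d p => PySem.Dict.modify d p.1 [] (· ++ [p.2])) init := by
      rw [hdB, List.foldl_map]
    rw [this, PySem.Dict.getD_foldl_modify_append, hgetD0]
    simp [List.filter_map, Function.comp_def, List.map_map]
  show dB.items = _
  rw [PySem.Dict.items_eq_map_keys dB hndB ([] : List (List (String × String))), hkeysB]
  apply List.map_congr_left
  intro c hc
  rw [hgetDB c, hMs]

-- ===== VERDICT (by name: the statement is the Claim_ definition above) =====
theorem group_events_by_task_spec : Claim_equal_group_events_by_task := by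
  intro events _
  unfold Spec_group_events_by_task
  rw [pv_A_form, pv_B_form]
  simp only [pv_filter_sorted]
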